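-- pv_equiv track=rewrite | github.com/naveen161101/Projects | app.py | _extract_insight_type
-- ===== SOURCE A (Python) =====
-- def _extract_insight_type(insight: str) -> str:
--     """Extract insight type from insight description"""
--     insight_lower = insight.lower()
--     if any(word in insight_lower for word in ['hire', 'recruit', 'employee', 'staff']):
--         return 'Recent Hires'
--     elif any(word in insight_lower for word in ['funding', 'investment', 'capital', 'financial']):
--         return 'Funding'
--     elif any(word in insight_lower for word in ['growth', 'expansion', 'market', 'revenue']):
--         return 'Growth Insights'
--     elif any(word in insight_lower for word in ['initiative', 'project', 'partnership', 'acquisition']):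
--         return 'Recent Initiatives'
--     elif any(word in insight_lower for word in ['management', 'executive', 'leadership', 'ceo', 'cto']):
--         return 'Senior Management'
--     else:
--         return 'Account Intelligence'
-- ===== SOURCE B (Python) =====
-- _KEYWORD_INDEX = (
--     ('hire', 0), ('recruit', 0), ('employee', 0), ('staff', 0),
--     ('funding', 1), ('investment', 1), ('capital', 1), ('financial', 1),
--     ('growth', 2), ('expansion', 2), ('market', 2), ('revenue', 2),
--     ('initiative', 3), ('project', 3), ('partnership', 3), ('acquisition', 3),
--     ('management', 4), ('executive', 4), ('leadership', 4), ('ceo', 4), ('cto', 4),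
-- )
-- _LABELS = ('Recent Hires', 'Funding', 'Growth Insights', 'Recent Initiatives',
--            'Senior Management', 'Account Intelligence')
--
-- def _extract_insight_type(insight: str) -> str:
--     # Aggregate the minimum matched category index over a flat keyword table;
--     # the branch priority of the original becomes min-index aggregation.
--     s = insight.lower()
--     best = len(_LABELS) - 1
--     for word, i in _KEYWORD_INDEX:
--         if word in s:
--             best = min(best, i)
--     return _LABELS[best]
-- ===== Notes on version B (the rewrite author's own statement) =====
-- stated objective: alternative
-- what changed: Replaces the five-branch if/elif chain of per-category any() checks with one accumulator pass over a flat keyword-to-index table that aggregates the minimum matched category index, then indexes a label table; no early return or branch chain.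
import Mathlib
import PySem

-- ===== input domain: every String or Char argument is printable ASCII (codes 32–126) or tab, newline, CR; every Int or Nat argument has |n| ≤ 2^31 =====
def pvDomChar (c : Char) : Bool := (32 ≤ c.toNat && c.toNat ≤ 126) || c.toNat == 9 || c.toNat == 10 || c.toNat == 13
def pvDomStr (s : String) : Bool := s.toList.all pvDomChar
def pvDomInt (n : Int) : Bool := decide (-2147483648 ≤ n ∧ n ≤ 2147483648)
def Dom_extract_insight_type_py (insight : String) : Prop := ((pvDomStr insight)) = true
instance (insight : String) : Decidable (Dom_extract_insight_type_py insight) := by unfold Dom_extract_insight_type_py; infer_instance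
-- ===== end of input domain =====

-- B replaces the if/elif chain with one min-index aggregation pass over a flat keyword table (alternative decomposition; same cost).


-- ===== PORT A =====
def extract_insight_type_py (insight : String) : String :=
  let insight_lower := PySem.Str.lower insight
  if ["hire", "recruit", "employee", "staff"].any (fun word => PySem.Str.isIn word insight_lower) then
    "Recent Hires"
  else if ["funding", "investment", "capital", "financial"].any (fun word => PySem.Str.isIn word insight_lower) then
    "Funding"
  else if ["growth", "expansion", "market", "revenue"].any (fun word => PySem.Str.isIn word insight_lower) then
    "Growth Insights"
  else if ["initiative", "project", "partnership", "acquisition"].any (fun word => PySem.Str.isIn word insight_lower) then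
    "Recent Initiatives"
  else if ["management", "executive", "leadership", "ceo", "cto"].any (fun word => PySem.Str.isIn word insight_lower) then
    "Senior Management"
  else
    "Account Intelligence"

-- ===== PORT B =====
def pvKeywordIndex : List (String × Nat) :=
  [ ("hire", 0), ("recruit", 0), ("employee", 0), ("staff", 0),
    ("funding", 1), ("investment", 1), ("capital", 1), ("financial", 1),
    ("growth", 2), ("expansion", 2), ("market", 2), ("revenue", 2),
    ("initiative", 3), ("project", 3), ("partnership", 3), ("acquisition", 3),
    ("management", 4), ("executive", 4), ("leadership", 4), ("ceo", 4), ("cto", 4) ]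

def pvLabels : List String :=
  ["Recent Hires", "Funding", "Growth Insights", "Recent Initiatives",
   "Senior Management", "Account Intelligence"]

-- single accumulator pass: minimum matched category index, initial 5 = len(_LABELS)-1
def extract_insight_type_py_alt (insight : String) : String :=
  let s := PySem.Str.lower insight
  let best := pvKeywordIndex.foldl
    (fun best p => if PySem.Str.isIn p.1 s then Nat.min best p.2 else best)
    (pvLabels.length - 1)
  -- best ≤ 5 < pvLabels.length always, so getD is exact for Python's _LABELS[best]
  pvLabels.getD best ""

-- ===== PRECONDITION & SPEC =====
def Spec_extract_insight_type_py (insight : String) (out : String) : Prop := out = extract_insight_type_py_alt insight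
instance (insight : String) (out : String) : Decidable (Spec_extract_insight_type_py insight out) := by unfold Spec_extract_insight_type_py; infer_instance

-- ===== CLAIM (what is proved, stated in full; the proofs are below) =====
def Claim_equal_extract_insight_type_py : Prop := ∀ (insight : String), Dom_extract_insight_type_py insight → Spec_extract_insight_type_py insight (extract_insight_type_py insight)

-- ===== LEMMAS AND PROOFS =====

-- a run of keywords sharing category index i folds to min with i iff any of them matches
theorem pv_fold_group (ws : List String) (i : Nat) (s : String) (acc : Nat) :
    List.foldl (fun best p => if PySem.Str.isIn p.1 s then Nat.min best p.2 else best) acc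
      (ws.map (fun w => (w, i)))
    = if ws.any (fun w => PySem.Str.isIn w s) then Nat.min acc i else acc := by
  induction ws generalizing acc with
  | nil => simp
  | cons w ws ih =>
    simp only [List.map_cons, List.foldl_cons, List.any_cons]
    rw [ih]
    by_cases h : PySem.Str.isIn w s
    · simp only [h]
      split <;> simp
    · simp only [h]
      simp

theorem extract_insight_type_py_spec' (insight : String) :
    extract_insight_type_py insight = extract_insight_type_py_alt insight := by
  unfold extract_insight_type_py extract_insight_type_py_alt
  have hsplit : pvKeywordIndex =
      (["hire", "recruit", "employee", "staff"].map (fun w => (w, 0)))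
      ++ (["funding", "investment", "capital", "financial"].map (fun w => (w, 1)))
      ++ (["growth", "expansion", "market", "revenue"].map (fun w => (w, 2)))
      ++ (["initiative", "project", "partnership", "acquisition"].map (fun w => (w, 3)))
      ++ (["management", "executive", "leadership", "ceo", "cto"].map (fun w => (w, 4))) := rfl
  rw [hsplit]
  simp only [List.foldl_append, pv_fold_group]
  generalize (["hire", "recruit", "employee", "staff"].any
      (fun w => PySem.Str.isIn w (PySem.Str.lower insight))) = b0
  generalize (["funding", "investment", "capital", "financial"].any
      (fun w => PySem.Str.isIn w (PySem.Str.lower insight))) = b1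
  generalize (["growth", "expansion", "market", "revenue"].any
      (fun w => PySem.Str.isIn w (PySem.Str.lower insight))) = b2
  generalize (["initiative", "project", "partnership", "acquisition"].any
      (fun w => PySem.Str.isIn w (PySem.Str.lower insight))) = b3
  generalize (["management", "executive", "leadership", "ceo", "cto"].any
      (fun w => PySem.Str.isIn w (PySem.Str.lower insight))) = b4
  cases b0 <;> cases b1 <;> cases b2 <;> cases b3 <;> cases b4 <;> rfl

-- ===== VERDICT =====
theorem extract_insight_type_py_spec : Claim_equal_extract_insight_type_py := by
  intro insight _
  exact extract_insight_type_py_spec' insight
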